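-- pv_equiv track=rewrite | github.com/natecard/agent-recall | src/agent_recall/cli/tui/commands/help_text.py | filter_command_suggestions
-- ===== SOURCE A (Python) =====
-- def filter_command_suggestions(
--     input_value: str, commands: list[str], max_results: int = 8
-- ) -> list[str]:
--     """Filter commands based on input value.
--
--     Performs case-insensitive prefix and substring matching.
--     Prefix matches are prioritized over substring matches.
--     """
--     if not input_value or not input_value.startswith("/"):
--         return []
--
--     input_lower = input_value.lower().strip()
--     prefix_matches: list[str] = []
--     substring_matches: list[str] = []
--
--     for cmd in commands:
--         cmd_lower = cmd.lower()
--         if cmd_lower.startswith(input_lower):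
--             prefix_matches.append(cmd)
--         elif input_lower in cmd_lower:
--             substring_matches.append(cmd)
--
--     # Combine prefix matches first, then substring matches
--     all_matches = prefix_matches + substring_matches
--     return all_matches[:max_results]
-- ===== SOURCE B (Python) =====
-- def filter_command_suggestions(
--     input_value: str, commands: list[str], max_results: int = 8
-- ) -> list[str]:
--     """One pass tagging each match with a rank (0 = prefix, 1 = substring-only),
--     then a stable sort by rank groups prefix matches first, keeping input order."""
--     if not input_value or not input_value.startswith("/"):
--         return []
--
--     input_lower = input_value.lower().strip()
--     tagged = []
--     for cmd in commands:
--         cmd_lower = cmd.lower()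
--         if input_lower in cmd_lower:
--             tagged.append((0 if cmd_lower.startswith(input_lower) else 1, cmd))
--     tagged.sort(key=lambda t: t[0])
--     return [cmd for _, cmd in tagged[:max_results]]
-- ===== Notes on version B (the rewrite author's own statement) =====
-- stated objective: alternative
-- what changed: Replaces A's two accumulator lists (prefix matches, substring matches, concatenated afterwards) by one pass that tags each match with a rank and a stable sort by rank that groups prefix matches first while keeping input order.
import Mathlib
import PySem

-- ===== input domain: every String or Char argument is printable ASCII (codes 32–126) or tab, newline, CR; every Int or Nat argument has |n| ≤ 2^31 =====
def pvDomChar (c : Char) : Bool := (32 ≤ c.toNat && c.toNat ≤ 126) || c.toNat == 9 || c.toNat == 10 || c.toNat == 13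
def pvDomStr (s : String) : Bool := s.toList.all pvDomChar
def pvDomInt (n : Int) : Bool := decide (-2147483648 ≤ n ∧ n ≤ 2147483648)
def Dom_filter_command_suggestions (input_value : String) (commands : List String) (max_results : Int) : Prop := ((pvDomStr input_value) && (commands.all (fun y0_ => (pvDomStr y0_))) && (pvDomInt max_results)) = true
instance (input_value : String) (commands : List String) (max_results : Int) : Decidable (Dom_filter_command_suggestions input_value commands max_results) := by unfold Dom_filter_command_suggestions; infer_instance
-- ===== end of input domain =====

-- B replaces A's two accumulator lists by one tag-the-matches pass plus a stable sort by rank (alternative decomposition, same cost).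

-- ===== PORT A =====
-- Faithful transliteration of A: two accumulator lists built in one loop, concatenated, sliced.
def filter_command_suggestions (input_value : String) (commands : List String) (max_results : Int) : List String :=
  if input_value = "" ∨ PySem.Str.startswith input_value "/" = false then []
  else
    let input_lower := PySem.Str.strip (PySem.Str.lower input_value)
    let r := commands.foldl (fun (acc : List String × List String) cmd =>
        let cmd_lower := PySem.Str.lower cmd
        if PySem.Str.startswith cmd_lower input_lower then (acc.1 ++ [cmd], acc.2)
        else if PySem.Str.isIn input_lower cmd_lower then (acc.1, acc.2 ++ [cmd])
        else acc) ([], [])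
    PySem.List.slice (r.1 ++ r.2) none (some max_results)

-- ===== PORT B =====
-- Transliteration of B (Source B): tag each match with a rank, stable sort by rank, slice, project.
def filter_command_suggestions_alt (input_value : String) (commands : List String) (max_results : Int) : List String :=
  if input_value = "" ∨ PySem.Str.startswith input_value "/" = false then []
  else
    let input_lower := PySem.Str.strip (PySem.Str.lower input_value)
    let tagged := commands.foldl (fun (acc : List (Int × String)) cmd =>
        let cmd_lower := PySem.Str.lower cmd
        if PySem.Str.isIn input_lower cmd_lower then
          acc ++ [((if PySem.Str.startswith cmd_lower input_lower then (0 : Int) else 1), cmd)]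
        else acc) []
    let sorted := PySem.List.sorted tagged (fun t => t.1) false
    (PySem.List.slice sorted none (some max_results)).map (fun t => t.2)

-- ===== PRECONDITION & SPEC =====
def Spec_filter_command_suggestions (input_value : String) (commands : List String) (max_results : Int) (out : List String) : Prop := out = filter_command_suggestions_alt input_value commands max_results
instance (input_value : String) (commands : List String) (max_results : Int) (out : List String) : Decidable (Spec_filter_command_suggestions input_value commands max_results out) := by unfold Spec_filter_command_suggestions; infer_instance

-- ===== CLAIM (what is proved, stated in full; the proofs are below) =====
def Claim_equal_filter_command_suggestions : Prop := ∀ (input_value : String) (commands : List String) (max_results : Int), Dom_filter_command_suggestions input_value commands max_results → Spec_filter_command_suggestions input_value commands max_results (filter_command_suggestions input_value commands max_results)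

-- ===== LEMMAS AND PROOFS =====


-- insertBy passes over a block of elements it is not 'before'
theorem pv_insertBy_skip {α : Type} (before : α → α → Bool) (x : α) (A B : List α)
    (h : ∀ a ∈ A, before x a = false) :
    PySem.List.insertBy before x (A ++ B) = A ++ PySem.List.insertBy before x B := by
  induction A with
  | nil => rfl
  | cons a A ih =>
    simp only [List.cons_append, PySem.List.insertBy]
    rw [h a (by simp)]
    simp only [Bool.false_eq_true, if_false, ih (fun a ha => h a (by simp [ha]))]

-- a stable insertion sort over ranks 0/1 is: the rank-0 elements, then the rank-1 elements
theorem pv_sort01 (ts A B : List (Int × String))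
    (hts : ∀ t ∈ ts, t.1 = 0 ∨ t.1 = 1)
    (hA : ∀ a ∈ A, a.1 = (0 : Int)) (hB : ∀ b ∈ B, b.1 = (1 : Int)) :
    List.foldl (fun acc x => PySem.List.insertBy (fun a b => decide (a.1 < b.1)) x acc) (A ++ B) ts
      = (A ++ ts.filter (fun t => t.1 == 0)) ++ (B ++ ts.filter (fun t => t.1 == 1)) := by
  induction ts generalizing A B with
  | nil => simp
  | cons x ts ih =>
    have hx := hts x (by simp)
    have hrest : ∀ t ∈ ts, t.1 = 0 ∨ t.1 = 1 := fun t ht => hts t (by simp [ht])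
    rcases hx with h0 | h1
    · have step : PySem.List.insertBy (fun a b => decide (a.1 < b.1)) x (A ++ B)
          = (A ++ [x]) ++ B := by
        rw [pv_insertBy_skip _ _ _ _ (fun a ha => by simp [hA a ha, h0])]
        cases B with
        | nil => simp [PySem.List.insertBy]
        | cons b B =>
          have hb := hB b (by simp)
          simp [PySem.List.insertBy, hb, h0]
      rw [List.foldl_cons, step,
        ih (A ++ [x]) B (hrest)
          (fun a ha => by rcases List.mem_append.mp ha with h | h
                          · exact hA a h
                          · simp at h; simp [h, h0]) hB]
      simp [h0]
    · have step : PySem.List.insertBy (fun a b => decide (a.1 < b.1)) x (A ++ B)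
          = A ++ (B ++ [x]) := by
        rw [PySem.List.insertBy_of_forall_not_before _ _ _ ?_, List.append_assoc]
        intro y hy
        rcases List.mem_append.mp hy with h | h
        · simp [hA y h, h1]
        · simp [hB y h, h1]
      rw [List.foldl_cons, step,
        ih A (B ++ [x]) hrest hA
          (fun b hb => by rcases List.mem_append.mp hb with h | h
                          · exact hB b h
                          · simp at h; simp [h, h1])]
      simp [h1]

-- hence the stable sort by rank is: rank-0 elements, then rank-1 elements, each in input order
theorem pv_sorted01 (ts : List (Int × String)) (hts : ∀ t ∈ ts, t.1 = 0 ∨ t.1 = 1) :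
    PySem.List.sorted ts (fun t => t.1)
      = ts.filter (fun t => t.1 == 0) ++ ts.filter (fun t => t.1 == 1) := by
  have h := pv_sort01 ts [] [] hts (by simp) (by simp)
  simpa [PySem.List.sorted_eq_foldl_insertBy] using h

-- a slice of a mapped list is the mapped slice (slice bounds depend only on the length)
theorem pv_slice_map {α β : Type} (g : α → β) (xs : List α) (b : Int) :
    PySem.List.slice (xs.map g) none (some b) = (PySem.List.slice xs none (some b)).map g := by
  simp [PySem.List.slice, List.map_take]

-- a case-insensitive prefix match is in particular a substring match
theorem pv_startswith_isIn (s p : List Char) (h : PySem.Chars.startswith s p = true) :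
    PySem.Chars.isIn p s = true :=
  (PySem.Chars.isIn_iff_infix _ _).mpr ((PySem.Chars.startswith_iff _ _).mp h).isInfix

-- projecting the second component of a tag-and-pair map gives the list back
theorem pv_map_snd_tag (l : List String) (g : String → Int) :
    l.map ((fun (t : Int × String) => t.2) ∘ fun c => (g c, c)) = l := by
  simp [Function.comp_def]

-- A's accumulator loop, characterised by two filters
theorem pv_foldA (il : String) (commands : List String) (acc : List String × List String) :
    commands.foldl (fun (acc : List String × List String) cmd =>
        let cmd_lower := PySem.Str.lower cmd
        if PySem.Str.startswith cmd_lower il then (acc.1 ++ [cmd], acc.2)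
        else if PySem.Str.isIn il cmd_lower then (acc.1, acc.2 ++ [cmd])
        else acc) acc
      = (acc.1 ++ commands.filter (fun c => PySem.Str.startswith (PySem.Str.lower c) il),
         acc.2 ++ commands.filter (fun c =>
            !PySem.Str.startswith (PySem.Str.lower c) il && PySem.Str.isIn il (PySem.Str.lower c))) := by
  induction commands generalizing acc with
  | nil => simp
  | cons c cs ih =>
    simp only [List.foldl_cons, List.filter_cons]
    by_cases hp : PySem.Str.startswith (PySem.Str.lower c) il = true
    · simp only [hp, if_true, Bool.not_true, Bool.false_and, Bool.false_eq_true, if_false, ih]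
      simp
    · rw [Bool.not_eq_true] at hp
      by_cases hs : PySem.Str.isIn il (PySem.Str.lower c) = true
      · simp only [hp, hs, Bool.false_eq_true, if_false, if_true, Bool.not_false, Bool.true_and, ih]
        simp
      · rw [Bool.not_eq_true] at hs
        simp only [hp, hs, Bool.false_eq_true, if_false, Bool.not_false, Bool.true_and, ih]

-- ===== VERDICT (by name: the statement is the Claim_ definition above) =====
theorem filter_command_suggestions_spec : Claim_equal_filter_command_suggestions := by
  intro input_value commands max_results _
  unfold Spec_filter_command_suggestions filter_command_suggestions filter_command_suggestions_alt
  by_cases hg : input_value = "" ∨ PySem.Str.startswith input_value "/" = false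
  · simp only [if_pos hg]
  · simp only [if_neg hg]
    set il := PySem.Str.strip (PySem.Str.lower input_value) with hil
    rw [pv_foldA il commands ([], []),
        PySem.List.foldl_append_if (fun c => PySem.Str.isIn il (PySem.Str.lower c))
          (fun c => ((if PySem.Str.startswith (PySem.Str.lower c) il then (0 : Int) else 1), c)) commands []]
    simp only [List.nil_append]
    rw [pv_sorted01 _ (fun t ht => by
          rcases List.mem_map.mp ht with ⟨c, _, rfl⟩
          by_cases h : PySem.Str.startswith (PySem.Str.lower c) il = true <;> simp only [h] <;> simp)]
    rw [List.filter_map, List.filter_map, List.filter_filter, List.filter_filter]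
    simp only [Function.comp]
    have e0 : commands.filter (fun c =>
          ((if PySem.Str.startswith (PySem.Str.lower c) il then (0:Int) else 1, c).1 == 0)
            && PySem.Str.isIn il (PySem.Str.lower c))
        = commands.filter (fun c => PySem.Str.startswith (PySem.Str.lower c) il) := by
      apply List.filter_congr
      intro c _
      simp only [PySem.Str.startswith_eq, PySem.Str.isIn_eq]
      by_cases h : PySem.Chars.startswith (PySem.Chars.lower c.toList) il.toList = true
      · simp [h, pv_startswith_isIn _ _ h]
      · rw [Bool.not_eq_true] at h
        simp [h]
    have e1 : commands.filter (fun c =>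
          ((if PySem.Str.startswith (PySem.Str.lower c) il then (0:Int) else 1, c).1 == 1)
            && PySem.Str.isIn il (PySem.Str.lower c))
        = commands.filter (fun c =>
            !PySem.Str.startswith (PySem.Str.lower c) il && PySem.Str.isIn il (PySem.Str.lower c)) := by
      apply List.filter_congr
      intro c _
      simp only [PySem.Str.startswith_eq, PySem.Str.isIn_eq]
      by_cases h : PySem.Chars.startswith (PySem.Chars.lower c.toList) il.toList = true
      · simp [h]
      · rw [Bool.not_eq_true] at h
        simp [h]
    rw [e0, e1, ← List.map_append, pv_slice_map, List.map_map]
    simp only [pv_map_snd_tag]
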